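-- pv_equiv track=rewrite | github.com/pypi-data/pypi-mirror-303 | packages/daptools/daptools-1.0-py3-none-any.whl/daptools/binUtils.py | bytes2bin
-- ===== SOURCE A (Python) =====
-- def bytes2bin(rawBytes, sz=8):
--     """Accepts a string of bytes (chars) and returns an array of bits representing
--     the bytes in big endian byte (Most significant byte/bit first) order.  Each byte
--     can have it's higher bits ignored by passing a sz."""
--     if sz < 1 or sz > 8:
--         raise ValueError("Invalid sz value: " + str(sz))
--     retVal = []
--     for b in rawBytes:
--         bits = []
--         b = ord(b)
--         while b > 0:
--             bits.append(b & 1)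
--             b >>= 1
--
--         if len(bits) < sz:
--             bits.extend([0] * (sz - len(bits)))
--         elif len(bits) > sz:
--             bits = bits[:sz]
--
--         bits.reverse()  # Big endian byte order.
--         retVal.extend(bits)
--
--     if len(retVal) == 0:
--         retVal = [0]
--     return retVal
-- ===== SOURCE B (Python) =====
-- def bytes2bin(rawBytes, sz=8):
--     """Big-endian bit array of the sz low bits of each byte; direct positional
--     extraction instead of A's while-loop + pad/truncate + reverse."""
--     if sz < 1 or sz > 8:
--         raise ValueError("Invalid sz value: " + str(sz))
--     out = [(ord(b) >> (sz - 1 - i)) & 1 for b in rawBytes for i in range(sz)]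
--     return out if out else [0]
-- ===== Notes on version B (the rewrite author's own statement) =====
-- stated objective: simpler
-- what changed: Each byte's bits are read off directly by positional shift-and-mask in big-endian order, eliminating A's LSB-first while loop, the pad/truncate branches and the final reverse.
import Mathlib
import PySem

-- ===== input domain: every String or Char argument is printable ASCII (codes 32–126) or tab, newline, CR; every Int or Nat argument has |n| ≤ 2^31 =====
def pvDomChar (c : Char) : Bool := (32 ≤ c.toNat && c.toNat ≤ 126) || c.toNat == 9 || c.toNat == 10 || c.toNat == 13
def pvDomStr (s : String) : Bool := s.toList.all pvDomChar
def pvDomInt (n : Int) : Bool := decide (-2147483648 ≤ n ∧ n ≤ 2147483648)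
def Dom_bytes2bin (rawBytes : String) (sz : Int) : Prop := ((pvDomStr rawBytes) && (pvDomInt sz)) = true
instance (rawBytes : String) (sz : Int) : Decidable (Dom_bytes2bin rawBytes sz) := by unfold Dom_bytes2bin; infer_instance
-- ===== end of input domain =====

-- B reads each byte's sz bits off directly by positional shift-and-mask (big-endian), replacing
-- A's LSB-first while loop, its pad/truncate branches and the final reverse; objective: simpler.

-- ===== PORT A =====
-- 'while b > 0: bits.append(b & 1); b >>= 1' (b = ord(char) is a Nat; b >>> 1 = b // 2)
def pvWhileBits (b : Nat) (bits : List Int) : List Int :=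
  if h : b > 0 then pvWhileBits (b >>> 1) (bits ++ [((b &&& 1 : Nat) : Int)]) else bits
  termination_by b
  decreasing_by simpa [Nat.shiftRight_one] using Nat.div_lt_self h (by norm_num)

def bytes2bin (rawBytes : String) (sz : Int) : List Int :=
  if sz < 1 ∨ sz > 8 then []   -- Python raises ValueError here; excluded by Pre_bytes2bin
  else
    let retVal := rawBytes.toList.foldl (fun retVal ch =>
      let bits := pvWhileBits ch.toNat []
      let bits :=
        if (bits.length : Int) < sz then bits ++ List.replicate (sz - (bits.length : Int)).toNat 0
        else if (bits.length : Int) > sz then bits.take sz.toNat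
        else bits
      retVal ++ bits.reverse) []
    if retVal.length = 0 then [0] else retVal

-- ===== PORT B =====
-- '[(ord(b) >> (sz-1-i)) & 1 for b in rawBytes for i in range(sz)]'; in this branch 1 ≤ sz ≤ 8,
-- so range(sz) = List.range sz.toNat and sz-1-i ≥ 0, making the Nat arithmetic exact.
def bytes2bin_alt (rawBytes : String) (sz : Int) : List Int :=
  if sz < 1 ∨ sz > 8 then []   -- Python raises ValueError here; excluded by Pre_bytes2bin
  else
    let out := rawBytes.toList.flatMap (fun b =>
      (List.range sz.toNat).map (fun i => (((b.toNat >>> (sz.toNat - 1 - i)) &&& 1 : Nat) : Int)))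
    if out = [] then [0] else out

-- ===== PRECONDITION & SPEC =====
-- Pre_ excludes exactly the inputs where A raises ValueError (sz < 1 or sz > 8).
def Pre_bytes2bin (rawBytes : String) (sz : Int) : Prop := 1 ≤ sz ∧ sz ≤ 8
instance (rawBytes : String) (sz : Int) : Decidable (Pre_bytes2bin rawBytes sz) := by unfold Pre_bytes2bin; infer_instance
def pvWitness_bytes2bin : String × Int := ("Az", 5)

def Spec_bytes2bin (rawBytes : String) (sz : Int) (out : List Int) : Prop := out = bytes2bin_alt rawBytes sz
instance (rawBytes : String) (sz : Int) (out : List Int) : Decidable (Spec_bytes2bin rawBytes sz out) := by unfold Spec_bytes2bin; infer_instance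

-- ===== CLAIM (what is proved, stated in full; the proofs are below) =====
def Claim_equal_bytes2bin : Prop := ∀ (rawBytes : String) (sz : Int), Dom_bytes2bin rawBytes sz → Pre_bytes2bin rawBytes sz → Spec_bytes2bin rawBytes sz (bytes2bin rawBytes sz)

-- ===== LEMMAS AND PROOFS =====

-- number of iterations of the while loop (bit length of b)
def pvBitLen (b : Nat) : Nat :=
  if b > 0 then pvBitLen (b >>> 1) + 1 else 0
  termination_by b
  decreasing_by simpa [Nat.shiftRight_one] using Nat.div_lt_self (by assumption) (by norm_num)

theorem pvWhileBits_spec (b : Nat) (acc : List Int) :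
    pvWhileBits b acc = acc ++ (List.range (pvBitLen b)).map (fun j => (((b >>> j) &&& 1 : Nat) : Int)) := by
  induction b using Nat.strong_induction_on generalizing acc with
  | _ b ih =>
    rw [pvWhileBits, pvBitLen]
    by_cases h : b > 0
    · rw [dif_pos h, if_pos h]
      rw [ih (b >>> 1) (by simpa [Nat.shiftRight_one] using Nat.div_lt_self h (by norm_num))]
      rw [List.range_succ_eq_map, List.map_cons, List.map_map]
      simp only [Nat.shiftRight_zero, List.append_assoc, List.singleton_append]
      congr 2
      apply List.map_congr_left
      intro j _
      simp [Function.comp, Nat.shiftRight_succ_inside]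
    · rw [dif_neg h, if_neg h]
      simp

theorem pvBitLen_bound (b : Nat) : b < 2 ^ pvBitLen b := by
  induction b using Nat.strong_induction_on with
  | _ b ih =>
    rw [pvBitLen]
    by_cases h : b > 0
    · simp only [h, if_true, Nat.shiftRight_one]
      have h2 := ih (b / 2) (Nat.div_lt_self h (by norm_num))
      rw [pow_succ]
      omega
    · simpa [h] using by omega

-- after pad/truncate, the LSB-first bit list has exactly length n for any n ≥ 1
theorem pvPadTrunc (v n : Nat) (hn : 1 ≤ n) :
    (if ((pvWhileBits v []).length : Int) < (n : Int) then
        pvWhileBits v [] ++ List.replicate ((n : Int) - ((pvWhileBits v []).length : Int)).toNat 0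
      else if ((pvWhileBits v []).length : Int) > (n : Int) then (pvWhileBits v []).take (n : Int).toNat
      else pvWhileBits v [])
    = (List.range n).map (fun j => (((v >>> j) &&& 1 : Nat) : Int)) := by
  have hs := pvWhileBits_spec v []
  simp only [List.nil_append] at hs
  rw [hs]
  set L := pvBitLen v with hL
  simp only [List.length_map, List.length_range]
  by_cases h1 : (L : Int) < (n : Int)
  · simp only [h1, if_true]
    have hLn : L < n := by exact_mod_cast h1
    have hcount : ((n : Int) - (L : Int)).toNat = n - L := by omega
    rw [hcount]
    -- high bits are zero: v < 2^L ≤ 2^j for j ≥ L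
    have hzero : ∀ j, L ≤ j → (((v >>> j) &&& 1 : Nat) : Int) = 0 := by
      intro j hj
      have : v < 2 ^ j := lt_of_lt_of_le (pvBitLen_bound v) (Nat.pow_le_pow_right (by norm_num) hj)
      simp [Nat.shiftRight_eq_div_pow, Nat.div_eq_of_lt this]
    rw [show n = L + (n - L) by omega, List.range_add, List.map_append]
    congr 1
    symm
    rw [List.eq_replicate_iff]
    constructor
    · simp
    · intro x hx
      simp only [List.mem_map, List.mem_map, List.mem_range] at hx
      obtain ⟨j, _, rfl⟩ := hx
      exact hzero _ (by omega)
  · simp only [h1, if_false]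
    by_cases h2 : (L : Int) > (n : Int)
    · simp only [h2, if_true]
      have hLn : n < L := by exact_mod_cast h2
      rw [show ((n : Int)).toNat = n by omega, ← List.map_take, List.take_range,
        min_eq_left hLn.le]
    · have : L = n := by omega
      simp [this]

-- reversing the LSB-first length-n bit list gives B's positional big-endian extraction
theorem pvReverseBits (v n : Nat) :
    ((List.range n).map (fun j => (((v >>> j) &&& 1 : Nat) : Int))).reverse
    = (List.range n).map (fun i => (((v >>> (n - 1 - i)) &&& 1 : Nat) : Int)) := by
  apply List.ext_getElem
  · simp
  · intro i h1 h2
    simp only [List.length_reverse, List.length_map, List.length_range] at h1 h2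
    rw [List.getElem_reverse]
    simp only [List.getElem_map, List.getElem_range, List.length_map, List.length_range]

-- ===== VERDICT (by name: the statement is the Claim_ definition above) =====
theorem bytes2bin_spec : Claim_equal_bytes2bin := by
  intro rawBytes sz _ hpre
  obtain ⟨h1, h8⟩ := hpre
  unfold Spec_bytes2bin bytes2bin bytes2bin_alt
  have hguard : ¬ (sz < 1 ∨ sz > 8) := by omega
  simp only [hguard, if_false]
  have hsz : (sz.toNat : Int) = sz := Int.toNat_of_nonneg (by omega)
  have hn1 : 1 ≤ sz.toNat := by omega
  have hbody : rawBytes.toList.foldl (fun retVal ch =>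
      let bits := pvWhileBits ch.toNat []
      let bits :=
        if (bits.length : Int) < sz then bits ++ List.replicate (sz - (bits.length : Int)).toNat 0
        else if (bits.length : Int) > sz then bits.take sz.toNat
        else bits
      retVal ++ bits.reverse) []
      = rawBytes.toList.flatMap (fun b =>
          (List.range sz.toNat).map (fun i => (((b.toNat >>> (sz.toNat - 1 - i)) &&& 1 : Nat) : Int))) := by
    rw [PySem.List.foldl_append_eq_flatMap]
    rw [List.nil_append]
    congr 1
    funext ch
    rw [← hsz, pvPadTrunc ch.toNat sz.toNat hn1, pvReverseBits]
    rw [show ((sz.toNat : Int)).toNat = sz.toNat from by omega]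
  rw [hbody]
  have hx : ∀ (X : List Int), (if X.length = 0 then ([0] : List Int) else X) = (if X = [] then [0] else X) := by
    intro X
    cases X <;> simp
  exact hx _
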